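-- pv_equiv track=rewrite | github.com/Brian-Ckwu/aicup-2022-nlp | preprocess.py | add_B_to_labels
-- ===== SOURCE A (Python) =====
-- from typing import List, Tuple, Any, Union
--
-- def add_B_to_labels(seq: List[int]) -> List[int]:
--     new_seq = seq.copy()
--     in_span = False # flag to keep track of whether the pointer is in the annotated span
--     for i in range(len(new_seq)):
--         if (in_span) and (new_seq[i] % 2 == 0):
--             in_span = False
--         elif (not in_span) and (new_seq[i] % 2 == 1): # the beginning of the annotated span
--             new_seq[i] += 1
--             in_span = True
--     return new_seq
-- ===== SOURCE B (Python) =====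
-- from typing import List
--
-- def add_B_to_labels(seq: List[int]) -> List[int]:
--     # stateless pass: x starts a span iff x is odd and its predecessor (0 for i==0) is even
--     return [x + 1 if x % 2 == 1 and p % 2 == 0 else x for x, p in zip(seq, [0] + seq)]
-- ===== Notes on version B (the rewrite author's own statement) =====
-- stated objective: simpler
-- what changed: Replaced the stateful in_span flag loop with a stateless one-line comprehension that decides each element from its own parity and the untouched predecessor's parity in the original list.
import Mathlib
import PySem

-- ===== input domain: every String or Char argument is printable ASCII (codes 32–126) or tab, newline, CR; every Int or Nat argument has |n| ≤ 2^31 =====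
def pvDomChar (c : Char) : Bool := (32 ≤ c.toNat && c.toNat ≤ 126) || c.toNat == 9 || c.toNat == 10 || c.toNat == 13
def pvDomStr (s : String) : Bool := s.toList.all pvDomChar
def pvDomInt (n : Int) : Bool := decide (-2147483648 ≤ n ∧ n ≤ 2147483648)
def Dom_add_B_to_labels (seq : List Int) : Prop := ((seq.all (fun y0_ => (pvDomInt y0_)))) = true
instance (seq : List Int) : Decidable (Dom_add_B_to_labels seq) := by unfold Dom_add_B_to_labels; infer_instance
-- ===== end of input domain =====

-- B replaces A's stateful in_span-flag loop with a stateless map over each element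
-- paired with its original predecessor (objective: simpler).

-- ===== PORT A =====
-- A's loop, element by element with the running in_span flag (the list copy is
-- rebuilt positionally; only new_seq[i] is read/written at step i, so the
-- structural recursion carries exactly the loop's state).
def add_B_to_labels_loop (in_span : Bool) (rest : List Int) : List Int :=
  match rest with
  | [] => []
  | x :: xs =>
    if in_span && (PySem.Int.mod x 2 == 0) then
      x :: add_B_to_labels_loop false xs
    else if !in_span && (PySem.Int.mod x 2 == 1) then
      (x + 1) :: add_B_to_labels_loop true xs
    else
      x :: add_B_to_labels_loop in_span xs

def add_B_to_labels (seq : List Int) : List Int :=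
  add_B_to_labels_loop false seq

-- ===== PORT B =====
def add_B_to_labels_alt (seq : List Int) : List Int :=
  (seq.zip (0 :: seq)).map (fun xp =>
    if PySem.Int.mod xp.1 2 == 1 && PySem.Int.mod xp.2 2 == 0 then xp.1 + 1 else xp.1)

-- ===== PRECONDITION & SPEC =====
def Spec_add_B_to_labels (seq : List Int) (out : List Int) : Prop := out = add_B_to_labels_alt seq
instance (seq : List Int) (out : List Int) : Decidable (Spec_add_B_to_labels seq out) := by unfold Spec_add_B_to_labels; infer_instance

-- ===== CLAIM (what is proved, stated in full; the proofs are below) =====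
def Claim_equal_add_B_to_labels : Prop := ∀ (seq : List Int), Dom_add_B_to_labels seq → Spec_add_B_to_labels seq (add_B_to_labels seq)

-- ===== LEMMAS AND PROOFS =====

-- invariant: A's in_span flag equals "the previous original element was odd"
theorem add_B_to_labels_loop_eq (rest : List Int) :
    ∀ (p : Int),
      add_B_to_labels_loop (PySem.Int.mod p 2 == 1) rest =
        (rest.zip (p :: rest)).map (fun xp =>
          if PySem.Int.mod xp.1 2 == 1 && PySem.Int.mod xp.2 2 == 0 then xp.1 + 1 else xp.1) := by
  induction rest with
  | nil => intro p; rfl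
  | cons x xs ih =>
    intro p
    have hx : PySem.Int.mod x 2 = 0 ∨ PySem.Int.mod x 2 = 1 := by
      have h : Int.fmod x 2 = x % 2 := by simp [Int.fmod_eq_emod]
      simp only [PySem.Int.mod]; omega
    have hp : PySem.Int.mod p 2 = 0 ∨ PySem.Int.mod p 2 = 1 := by
      have h : Int.fmod p 2 = p % 2 := by simp [Int.fmod_eq_emod]
      simp only [PySem.Int.mod]; omega
    rcases hx with hx | hx <;> rcases hp with hp | hp <;>
      simp only [add_B_to_labels_loop, List.zip_cons_cons, List.map_cons, hx, hp, ← ih x] <;>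
      simp

-- ===== VERDICT (by name: the statement is the Claim_ definition above) =====
theorem add_B_to_labels_spec : Claim_equal_add_B_to_labels := by
  intro seq _
  unfold Spec_add_B_to_labels add_B_to_labels add_B_to_labels_alt
  have h := add_B_to_labels_loop_eq seq 0
  simpa using h
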